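-- pv_equiv track=rewrite | github.com/luiz-gustavo-alves/UNIFESP | Seguranca-Computacional/Encrypted-Chat-v1/config/utils.py | chunk_bin_values
-- ===== SOURCE A (Python) =====
-- def chunk_bin_values(bin_values, send_nickname = True):
--
--     nickname = ""
--
--     if (send_nickname):
--         index = bin_values.index(":")
--         nickname = bin_values[:index]
--         message = bin_values[(index + 2):]
--
--     else:
--         message = bin_values
--
--     chunk = 8
--     counter = 0
--     chunked_bin_values = ""
--
--     for bin_value in message:
--
--         if (counter < chunk):
--             chunked_bin_values += bin_value
--             counter += 1
--         else:
--             chunked_bin_values += " " + bin_value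
--             counter = 1
--
--     return chunked_bin_values, nickname
-- ===== SOURCE B (Python) =====
-- def chunk_bin_values(bin_values, send_nickname = True):
--
--     nickname = ""
--
--     if (send_nickname):
--         index = bin_values.index(":")
--         nickname = bin_values[:index]
--         message = bin_values[(index + 2):]
--     else:
--         message = bin_values
--
--     chunks = [message[i:i + 8] for i in range(0, len(message), 8)]
--     return " ".join(chunks), nickname
-- ===== Notes on version B (the rewrite author's own statement) =====
-- stated objective: faster
-- what changed: replaced the per-character accumulation loop with a counter by stride-8 slicing joined with str.join, which avoids repeated string concatenation; nickname extraction is unchanged, so A's ValueError when the colon separator is absent is preserved and excluded by Pre_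
import Mathlib
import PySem

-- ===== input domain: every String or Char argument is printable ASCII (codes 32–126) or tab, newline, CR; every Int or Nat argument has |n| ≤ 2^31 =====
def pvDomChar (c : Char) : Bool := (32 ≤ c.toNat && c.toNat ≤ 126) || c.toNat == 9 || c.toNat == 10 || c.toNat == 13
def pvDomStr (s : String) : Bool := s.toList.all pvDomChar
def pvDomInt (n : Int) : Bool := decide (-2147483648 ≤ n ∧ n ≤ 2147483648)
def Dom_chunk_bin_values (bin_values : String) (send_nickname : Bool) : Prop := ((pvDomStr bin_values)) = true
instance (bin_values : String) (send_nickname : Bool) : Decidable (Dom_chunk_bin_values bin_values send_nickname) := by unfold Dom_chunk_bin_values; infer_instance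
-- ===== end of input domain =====

-- B replaces A's per-character counter loop by stride-8 slices joined with a separator (measured faster by a constant factor).
-- Pre_ excludes exactly the inputs on which A raises ValueError (missing colon separator); B raises there too.


-- ===== PORT A =====
-- the loop body: 'chunked_bin_values += …' ported as List Char accumulation (String concatenation is opaque to the kernel)
def pvStepA (st : List Char × Int) (c : Char) : List Char × Int :=
  if st.2 < 8 then (st.1 ++ [c], st.2 + 1) else (st.1 ++ [' ', c], 1)

def chunk_bin_values (bin_values : String) (send_nickname : Bool) : String × String :=
  let nm : String × String :=
    if send_nickname then
      -- bin_values.index(":") raises ValueError when ':' is absent → excluded by Pre_; under Pre_ it equals str.find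
      let index := PySem.Str.find bin_values ":"
      (PySem.Str.slice bin_values none (some index), PySem.Str.slice bin_values (some (index + 2)) none)
    else ("", bin_values)
  let r := nm.2.toList.foldl pvStepA ([], 0)
  (String.ofList r.1, nm.1)

-- ===== PORT B =====
def chunk_bin_values_alt (bin_values : String) (send_nickname : Bool) : String × String :=
  let nm : String × String :=
    if send_nickname then
      let index := PySem.Str.find bin_values ":"
      (PySem.Str.slice bin_values none (some index), PySem.Str.slice bin_values (some (index + 2)) none)
    else ("", bin_values)
  let m := nm.2.toList
  let chunks := (PySem.List.pyRange 0 (m.length : Int) 8).map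
      (fun i => PySem.List.slice m (some i) (some (i + 8)))
  (String.ofList (PySem.Chars.join [' '] chunks), nm.1)

-- ===== PRECONDITION & SPEC =====
-- Pre_ excludes exactly the inputs on which A raises ValueError (send_nickname and no ':' in bin_values).
def Pre_chunk_bin_values (bin_values : String) (send_nickname : Bool) : Prop :=
  send_nickname = true → PySem.Str.isIn ":" bin_values = true
instance (bin_values : String) (send_nickname : Bool) : Decidable (Pre_chunk_bin_values bin_values send_nickname) := by unfold Pre_chunk_bin_values; infer_instance

def pvWitness_chunk_bin_values : String × Bool := ("nick: 0101010111", true)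

def Spec_chunk_bin_values (bin_values : String) (send_nickname : Bool) (out : String × String) : Prop := out = chunk_bin_values_alt bin_values send_nickname
instance (bin_values : String) (send_nickname : Bool) (out : String × String) : Decidable (Spec_chunk_bin_values bin_values send_nickname out) := by unfold Spec_chunk_bin_values; infer_instance

-- ===== CLAIM (what is proved, stated in full; the proofs are below) =====
def Claim_equal_chunk_bin_values : Prop := ∀ (bin_values : String) (send_nickname : Bool), Dom_chunk_bin_values bin_values send_nickname → Pre_chunk_bin_values bin_values send_nickname → Spec_chunk_bin_values bin_values send_nickname (chunk_bin_values bin_values send_nickname)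

-- ===== LEMMAS AND PROOFS =====

-- structural form of B's chunk list
def chunksOf (l : List Char) : List (List Char) :=
  if h : l = [] then [] else l.take 8 :: chunksOf (l.drop 8)
  termination_by l.length
  decreasing_by simp only [List.length_drop]; have := List.length_pos_iff.mpr h; omega

lemma chunksOf_nil : chunksOf [] = [] := by rw [chunksOf]; simp

lemma chunksOf_ne_nil (l : List Char) (h : l ≠ []) :
    chunksOf l = l.take 8 :: chunksOf (l.drop 8) := by
  rw [chunksOf]; simp [h]

lemma chunksOf_key : ∀ (n : Nat) (l : List Char), (l.length + 7) / 8 = n →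
    (List.range n).map
      (fun (k : Nat) => PySem.List.slice l (some ((0 : Int) + 8 * (k : Int))) (some ((0 : Int) + 8 * (k : Int) + 8)))
    = chunksOf l := by
  intro n
  induction n with
  | zero =>
    intro l hn
    have h0 : l = [] := by
      rw [← List.length_eq_zero_iff]; omega
    subst h0
    simp [chunksOf_nil]
  | succ m ih =>
    intro l hn
    have hlen1 : 1 ≤ l.length := by omega
    rw [List.range_succ_eq_map, List.map_cons, List.map_map]
    rw [chunksOf_ne_nil l (by rw [← List.length_pos_iff]; omega)]
    congr 1
    · have h := PySem.List.slice_natCast_add l 0 8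
      simpa using h
    · have hdrop : ((l.drop 8).length + 7) / 8 = m := by
        simp only [List.length_drop]; omega
      rw [← ih (l.drop 8) hdrop]
      apply List.map_congr_left
      intro k hk
      simp only [Function.comp_apply, Nat.succ_eq_add_one]
      have e2 : (0 : Int) + 8 * ((k + 1 : Nat) : Int) + 8 = ((8 * (k + 1) : Nat) : Int) + ((8 : Nat) : Int) := by
        push_cast; ring
      have e1 : (0 : Int) + 8 * ((k + 1 : Nat) : Int) = ((8 * (k + 1) : Nat) : Int) := by
        push_cast; ring
      rw [e2, e1, PySem.List.slice_natCast_add]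
      have e4 : (0 : Int) + 8 * ((k : Nat) : Int) + 8 = ((8 * k : Nat) : Int) + ((8 : Nat) : Int) := by
        push_cast; ring
      have e3 : (0 : Int) + 8 * ((k : Nat) : Int) = ((8 * k : Nat) : Int) := by
        push_cast; ring
      rw [e4, e3, PySem.List.slice_natCast_add]
      rw [List.drop_drop]
      congr 2
      omega

-- B's pyRange/slice comprehension IS chunksOf
lemma range_slice_eq_chunksOf (l : List Char) :
    (PySem.List.pyRange 0 (l.length : Int) 8).map
      (fun i => PySem.List.slice l (some i) (some (i + 8))) = chunksOf l := by
  rw [PySem.List.pyRange_of_pos 0 (l.length : Int) (by norm_num : (0:Int) < 8), List.map_map]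
  have hq : (if (0:Int) < (l.length : Int) then (((l.length : Int) - 0 + 8 - 1) / 8).toNat else 0)
      = (l.length + 7) / 8 := by
    split_ifs <;> omega
  rw [hq]
  exact chunksOf_key ((l.length + 7) / 8) l rfl

-- the accumulator of A's loop only grows: extract it
lemma foldl_stepA_acc (l : List Char) : ∀ (acc : List Char) (k : Int),
    (l.foldl pvStepA (acc, k)).1 = acc ++ (l.foldl pvStepA ([], k)).1 := by
  induction l with
  | nil => intro acc k; simp
  | cons c l ih =>
    intro acc k
    by_cases hk : k < 8
    · simp only [List.foldl_cons, pvStepA, if_pos hk, List.nil_append]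
      rw [ih (acc ++ [c]) (k + 1), ih [c] (k + 1)]
      simp
    · simp only [List.foldl_cons, pvStepA, if_neg hk, List.nil_append]
      rw [ih (acc ++ [' ', c]) 1, ih [' ', c] 1]
      simp

-- running A's loop through a block of ≤ 8 - j characters just appends them
lemma foldl_stepA_block : ∀ (t : List Char) (j : Nat), t.length + j ≤ 8 →
    ∀ (acc d : List Char),
      (t ++ d).foldl pvStepA (acc, (j : Int)) = d.foldl pvStepA (acc ++ t, ((j + t.length : Nat) : Int)) := by
  intro t
  induction t with
  | nil => intro j hj acc d; simp
  | cons c t ih =>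
    intro j hj acc d
    simp only [List.length_cons] at hj
    have hk : ((j : Int)) < 8 := by exact_mod_cast (by omega : j < 8)
    simp only [List.cons_append, List.foldl_cons, pvStepA, if_pos hk]
    rw [show ((j : Int)) + 1 = ((j + 1 : Nat) : Int) by push_cast; ring]
    rw [ih (j + 1) (by omega) (acc ++ [c]) d]
    have e1 : acc ++ [c] ++ t = acc ++ (c :: t) := by simp
    have e2 : j + 1 + t.length = j + (c :: t).length := by simp; omega
    rw [e1, e2]

-- from a full counter, the loop emits a separator and restarts
lemma foldl_stepA_full (acc d : List Char) (hd : d ≠ []) :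
    (d.foldl pvStepA (acc, (8 : Int))).1 = acc ++ [' '] ++ (d.foldl pvStepA ([], 0)).1 := by
  obtain ⟨c, d', rfl⟩ := List.exists_cons_of_ne_nil hd
  simp only [List.foldl_cons, pvStepA]
  rw [if_neg (by norm_num), if_pos (by norm_num)]
  simp only [List.nil_append, zero_add]
  rw [foldl_stepA_acc d' (acc ++ [' ', c]) 1, foldl_stepA_acc d' [c] 1]
  simp

-- MAIN: A's loop from ([], 0) produces exactly " ".join of the 8-chunks
lemma foldl_stepA_eq_join (m : List Char) :
    (m.foldl pvStepA ([], 0)).1 = PySem.Chars.join [' '] (chunksOf m) := by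
  by_cases h : m = []
  · subst h; simp [chunksOf_nil, PySem.Chars.join_nil]
  · have hsplit := List.take_append_drop 8 m
    have hb : m.foldl pvStepA ([], (0 : Int)) = (m.drop 8).foldl pvStepA (m.take 8, ((m.take 8).length : Int)) := by
      have hblk := foldl_stepA_block (m.take 8) 0 (by simp) [] (m.drop 8)
      rw [hsplit] at hblk
      simpa using hblk
    by_cases hd : m.drop 8 = []
    · rw [hb, hd]
      simp only [List.foldl_nil]
      rw [chunksOf_ne_nil m h, hd, chunksOf_nil, PySem.Chars.join_singleton]
    · have h8 : 8 ≤ m.length := by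
        by_contra hc
        exact hd (by rw [List.drop_eq_nil_iff]; omega)
      have hlen8 : (m.take 8).length = 8 := by simp [List.length_take, Nat.min_eq_left h8]
      rw [hb, hlen8]
      simp only [Nat.cast_ofNat]
      rw [foldl_stepA_full (m.take 8) (m.drop 8) hd]
      have hrec := foldl_stepA_eq_join (m.drop 8)
      rw [hrec]
      rw [chunksOf_ne_nil m h, chunksOf_ne_nil (m.drop 8) hd, PySem.Chars.join_cons_cons,
        ← chunksOf_ne_nil (m.drop 8) hd]
  termination_by m.length
  decreasing_by simp only [List.length_drop]; omega

-- ===== VERDICT (by name: the statement is the Claim_ definition above) =====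
theorem chunk_bin_values_spec : Claim_equal_chunk_bin_values := by
  intro bin_values send_nickname _ _
  unfold Spec_chunk_bin_values chunk_bin_values chunk_bin_values_alt
  dsimp only
  rw [range_slice_eq_chunksOf, foldl_stepA_eq_join]
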